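-- pv_equiv track=rewrite | github.com/machinereading/ELD | src/utils/NEREval.py | metric_sum
-- ===== SOURCE A (Python) =====
-- def metric_sum(a, b):
-- 	a_eval, a_type = a
-- 	b_eval, b_type = b
-- 	for key in a_eval.keys():
-- 		for kkey in a_eval[key].keys():
-- 			a_eval[key][kkey] += b_eval[key][kkey]
-- 	for t in a_type.keys():
-- 		for key in a_type[t].keys():
-- 			for kkey in a_type[t][key]:
-- 				a_type[t][key][kkey] += b_type[t][key][kkey]
--
-- 	return a_eval, a_type
-- ===== SOURCE B (Python) =====
-- def metric_sum(a, b):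
--     # Different strategy: flatten b into ONE flat dict keyed by full key-path
--     # tuples, then rebuild the result by walking a's structure and looking each
--     # leaf's path up in the flat dict. (A mutates a in place; the equivalence
--     # claimed is about the return value only -- B builds fresh dicts.)
--     def flatten(d, prefix=()):
--         out = {}
--         for k, v in d.items():
--             if isinstance(v, dict):
--                 out.update(flatten(v, prefix + (k,)))
--             else:
--                 out[prefix + (k,)] = v
--         return out
--
--     def rebuild(d, flat, prefix=()):
--         return {k: (rebuild(v, flat, prefix + (k,)) if isinstance(v, dict)
--                     else v + flat[prefix + (k,)])
--                 for k, v in d.items()}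
--
--     a_eval, a_type = a
--     b_eval, b_type = b
--     return rebuild(a_eval, flatten(b_eval)), rebuild(a_type, flatten(b_type))
-- ===== Notes on version B (the rewrite author's own statement) =====
-- stated objective: alternative
-- what changed: Instead of A's two fixed-depth in-place loop nests, B flattens b into one flat dict keyed by full key-path tuples and then rebuilds fresh result dicts by walking a's structure and looking each leaf's path up in the flat dict (A mutates a in place; equivalence is about the return value); Pre_ excludes only inputs whose leaf key path in a is missing from b, where A raises KeyError.
import Mathlib
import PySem

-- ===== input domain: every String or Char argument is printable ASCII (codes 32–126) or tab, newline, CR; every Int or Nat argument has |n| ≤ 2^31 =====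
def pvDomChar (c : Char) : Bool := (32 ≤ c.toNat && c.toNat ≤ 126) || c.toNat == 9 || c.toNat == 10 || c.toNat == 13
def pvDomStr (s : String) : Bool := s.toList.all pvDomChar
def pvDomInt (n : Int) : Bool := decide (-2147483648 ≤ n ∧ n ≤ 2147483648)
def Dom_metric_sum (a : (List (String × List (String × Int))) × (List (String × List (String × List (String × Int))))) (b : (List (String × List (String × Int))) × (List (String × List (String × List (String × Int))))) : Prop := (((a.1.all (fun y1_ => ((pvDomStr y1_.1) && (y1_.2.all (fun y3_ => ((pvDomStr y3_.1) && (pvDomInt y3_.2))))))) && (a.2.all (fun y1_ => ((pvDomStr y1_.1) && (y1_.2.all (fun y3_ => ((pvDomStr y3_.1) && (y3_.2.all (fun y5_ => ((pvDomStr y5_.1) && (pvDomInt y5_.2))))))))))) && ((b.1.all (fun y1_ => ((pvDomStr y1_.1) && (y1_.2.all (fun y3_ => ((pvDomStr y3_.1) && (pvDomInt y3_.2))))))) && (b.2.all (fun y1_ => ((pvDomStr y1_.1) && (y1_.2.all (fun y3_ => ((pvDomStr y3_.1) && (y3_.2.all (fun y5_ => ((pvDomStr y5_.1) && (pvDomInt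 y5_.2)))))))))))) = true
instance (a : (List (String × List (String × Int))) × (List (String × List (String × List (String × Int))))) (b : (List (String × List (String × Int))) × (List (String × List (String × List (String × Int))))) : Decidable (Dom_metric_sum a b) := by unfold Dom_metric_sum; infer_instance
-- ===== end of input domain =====

-- B flattens b into one flat dict keyed by full key-path tuples and rebuilds fresh result
-- dicts by walking a's structure (A mutates a in place; the equivalence proved here is
-- about the RETURN value only).

-- Shared assoc-list renderings of Python dict primitives (dicts are assoc lists here):
-- pget d k dflt = d[k] with first-match lookup; amodify d k f = in-place d[k] = f(d[k]).
def pget {κ α : Type} [DecidableEq κ] : List (κ × α) → κ → α → α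
  | [], _, dflt => dflt
  | (k', v) :: rest, k, dflt => if k' = k then v else pget rest k dflt

def amodify {α : Type} : List (String × α) → String → (α → α) → List (String × α)
  | [], _, _ => []
  | (k', v) :: rest, k, f => if k' = k then (k', f v) :: rest else (k', v) :: amodify rest k f

-- ===== PORT A =====
-- Literal transliteration: the outer folds iterate the snapshot of a's key list, the inner
-- folds re-read the current accumulator exactly where Python re-reads the mutated dict, and
-- each 'a[...][...] += b[...][...]' is a nested amodify with a pget chain into b.
def metric_sum (a : (List (String × List (String × Int))) × (List (String × List (String × List (String × Int))))) (b : (List (String × List (String × Int))) × (List (String × List (String × List (String × Int))))) : (List (String × List (String × Int))) × (List (String × List (String × List (String × Int)))) :=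
  ((a.1.map Prod.fst).foldl (fun acc key =>
      ((pget acc key []).map Prod.fst).foldl (fun ac kkey =>
        amodify ac key (fun inner => amodify inner kkey (fun v => v + pget (pget b.1 key []) kkey 0))) acc) a.1,
   (a.2.map Prod.fst).foldl (fun acc t =>
      ((pget acc t []).map Prod.fst).foldl (fun ac key =>
        ((pget (pget ac t []) key []).map Prod.fst).foldl (fun ac2 kkey =>
          amodify ac2 t (fun d2 => amodify d2 key (fun d1 => amodify d1 kkey (fun v => v + pget (pget (pget b.2 t []) key []) kkey 0)))) ac) acc) a.2)

-- ===== PORT B =====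
-- Source B's recursive 'flatten' threads a prefix and builds one flat dict (out[path] = v in
-- iteration order; dict build = append at fresh key); it is instantiated here at each of
-- the two fixed depths the Lean types give it.
def flatten_leaf (pre : String) (m : List (String × Int)) : List ((String × String) × Int) :=
  m.foldl (fun out q => out ++ [((pre, q.1), q.2)]) []

def flatten2 (d : List (String × List (String × Int))) : List ((String × String) × Int) :=
  d.foldl (fun out p => out ++ flatten_leaf p.1 p.2) []

def flatten_mid (pre : String) (m : List (String × List (String × Int))) : List ((String × String × String) × Int) :=
  m.foldl (fun out q => out ++ q.2.foldl (fun o r => o ++ [((pre, q.1, r.1), r.2)]) []) []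

def flatten3 (d : List (String × List (String × List (String × Int)))) : List ((String × String × String) × Int) :=
  d.foldl (fun out p => out ++ flatten_mid p.1 p.2) []

-- Source B's 'rebuild' is a dict comprehension over a's structure: recurse at dict values, add
-- flat[path] at leaves; pget's default 0 stands in for the KeyError of flat[path], which
-- Pre_ excludes (exact on Pre_).
def metric_sum_alt (a : (List (String × List (String × Int))) × (List (String × List (String × List (String × Int))))) (b : (List (String × List (String × Int))) × (List (String × List (String × List (String × Int))))) : (List (String × List (String × Int))) × (List (String × List (String × List (String × Int)))) :=
  let fe := flatten2 b.1
  let ft := flatten3 b.2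
  (a.1.map (fun p => (p.1, p.2.map (fun q => (q.1, q.2 + pget fe (p.1, q.1) 0)))),
   a.2.map (fun p => (p.1, p.2.map (fun q => (q.1, q.2.map (fun r => (r.1, r.2 + pget ft (p.1, q.1, r.1) 0)))))))

-- ===== PRECONDITION & SPEC =====
-- Pre_ excludes (i) inputs where some key path of a with a leaf entry is missing in b —
-- there Python A (and B) raise KeyError — and (ii) assoc lists with duplicate keys at some
-- nesting level, which have no Python-dict counterpart (Python dicts always have unique keys).
def Pre_metric_sum (a : (List (String × List (String × Int))) × (List (String × List (String × List (String × Int))))) (b : (List (String × List (String × Int))) × (List (String × List (String × List (String × Int))))) : Prop :=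
  (a.1.map Prod.fst).Nodup ∧ (∀ p ∈ a.1, (p.2.map Prod.fst).Nodup) ∧
  (a.2.map Prod.fst).Nodup ∧ (∀ p ∈ a.2, (p.2.map Prod.fst).Nodup ∧ ∀ q ∈ p.2, (q.2.map Prod.fst).Nodup) ∧
  (b.1.map Prod.fst).Nodup ∧ (∀ p ∈ b.1, (p.2.map Prod.fst).Nodup) ∧
  (b.2.map Prod.fst).Nodup ∧ (∀ p ∈ b.2, (p.2.map Prod.fst).Nodup ∧ ∀ q ∈ p.2, (q.2.map Prod.fst).Nodup) ∧
  (∀ p ∈ a.1, ∀ q ∈ p.2, ∃ p' ∈ b.1, p'.1 = p.1 ∧ q.1 ∈ p'.2.map Prod.fst) ∧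
  (∀ p ∈ a.2, ∀ q ∈ p.2, ∀ r ∈ q.2, ∃ p' ∈ b.2, p'.1 = p.1 ∧ ∃ q' ∈ p'.2, q'.1 = q.1 ∧ r.1 ∈ q'.2.map Prod.fst)
instance (a : (List (String × List (String × Int))) × (List (String × List (String × List (String × Int))))) (b : (List (String × List (String × Int))) × (List (String × List (String × List (String × Int))))) : Decidable (Pre_metric_sum a b) := by unfold Pre_metric_sum; infer_instance

def pvWitness_metric_sum : ((List (String × List (String × Int))) × (List (String × List (String × List (String × Int))))) × ((List (String × List (String × Int))) × (List (String × List (String × List (String × Int))))) :=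
  (([("a", [("x", 1), ("y", 2)])], [("t", [("k", [("m", 3)])])]),
   ([("a", [("x", 10), ("y", 20)])], [("t", [("k", [("m", 30)])])]))

def Spec_metric_sum (a : (List (String × List (String × Int))) × (List (String × List (String × List (String × Int))))) (b : (List (String × List (String × Int))) × (List (String × List (String × List (String × Int))))) (out : (List (String × List (String × Int))) × (List (String × List (String × List (String × Int))))) : Prop := out = metric_sum_alt a b
instance (a : (List (String × List (String × Int))) × (List (String × List (String × List (String × Int))))) (b : (List (String × List (String × Int))) × (List (String × List (String × List (String × Int))))) (out : (List (String × List (String × Int))) × (List (String × List (String × List (String × Int))))) : Decidable (Spec_metric_sum a b out) := by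
  unfold Spec_metric_sum
  have d2 : DecidableEq (List (String × List (String × Int))) := by infer_instance
  have d3 : DecidableEq (List (String × List (String × List (String × Int)))) := by infer_instance
  infer_instance

-- ===== CLAIM (what is proved, stated in full; the proofs are below) =====
def Claim_equal_metric_sum : Prop := ∀ (a : (List (String × List (String × Int))) × (List (String × List (String × List (String × Int))))) (b : (List (String × List (String × Int))) × (List (String × List (String × List (String × Int))))), Dom_metric_sum a b → Pre_metric_sum a b → Spec_metric_sum a b (metric_sum a b)

-- ===== LEMMAS AND PROOFS =====

theorem amodify_id {α : Type} (d : List (String × α)) (k : String) : amodify d k (fun v => v) = d := by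
  induction d with
  | nil => rfl
  | cons p rest ih =>
    obtain ⟨k', v⟩ := p
    by_cases h : k' = k <;> simp [amodify, h, ih]

theorem amodify_compose {α : Type} (d : List (String × α)) (k : String) (f g : α → α) :
    amodify (amodify d k f) k g = amodify d k (fun v => g (f v)) := by
  induction d with
  | nil => rfl
  | cons p rest ih =>
    obtain ⟨k', v⟩ := p
    by_cases h : k' = k <;> simp [amodify, h, ih]

theorem keys_amodify {α : Type} (d : List (String × α)) (k : String) (f : α → α) :
    (amodify d k f).map Prod.fst = d.map Prod.fst := by
  induction d with
  | nil => rfl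
  | cons p rest ih =>
    obtain ⟨k', v⟩ := p
    by_cases h : k' = k <;> simp [amodify, h, ih]

theorem amodify_congr {α : Type} {d : List (String × α)} {k : String} (dflt : α) {f g : α → α}
    (ht : k ∈ d.map Prod.fst) (h : f (pget d k dflt) = g (pget d k dflt)) :
    amodify d k f = amodify d k g := by
  induction d with
  | nil => simp at ht
  | cons p rest ih =>
    obtain ⟨k', v⟩ := p
    by_cases hk : k' = k
    · subst hk
      have h' : f v = g v := by simpa [pget] using h
      simp [amodify, h']
    · have ht' : k ∈ rest.map Prod.fst := by
        rcases List.mem_cons.mp ht with h1 | h1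
        · exact absurd h1.symm hk
        · exact h1
      simp only [pget, if_neg hk] at h
      simp [amodify, hk, ih ht' h]

theorem foldl_amodify_same {α ι : Type} (t : String) (u : ι → α → α) (ks : List ι)
    (acc : List (String × α)) :
    ks.foldl (fun ac i => amodify ac t (u i)) acc
      = amodify acc t (fun w => ks.foldl (fun w i => u i w) w) := by
  induction ks generalizing acc with
  | nil => exact (amodify_id ..).symm
  | cons i ks ih =>
    simp only [List.foldl_cons]
    rw [ih, amodify_compose]

theorem fold_modify_self {α ι : Type} (t : String) (dflt : α) (S : ι → α → α → α) (ks : List ι)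
    (d : List (String × α)) (ht : t ∈ d.map Prod.fst) :
    ks.foldl (fun acc i => amodify acc t (S i (pget acc t dflt))) d
      = amodify d t (fun w => ks.foldl (fun w i => S i w w) w) := by
  induction ks generalizing d with
  | nil => exact (amodify_id ..).symm
  | cons i ks ih =>
    simp only [List.foldl_cons]
    have ht' : t ∈ (amodify d t (S i (pget d t dflt))).map Prod.fst := by
      rw [keys_amodify]; exact ht
    rw [ih _ ht', amodify_compose]
    exact amodify_congr dflt ht (by simp)

theorem fold_cons_comm {α : Type} (dflt : α) (step : List (String × α) → String → List (String × α))
    (Φ : String → α → α → α)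
    (hstep : ∀ acc k, k ∈ acc.map Prod.fst → step acc k = amodify acc k (Φ k (pget acc k dflt)))
    (ks : List String) (k : String) (x : α) (D : List (String × α))
    (hne : ∀ y ∈ ks, y ≠ k) (hmem : ∀ y ∈ ks, y ∈ D.map Prod.fst) :
    ks.foldl step ((k, x) :: D) = (k, x) :: ks.foldl step D := by
  induction ks generalizing D with
  | nil => rfl
  | cons k0 ks ih =>
    have hk0 : k0 ∈ D.map Prod.fst := hmem k0 List.mem_cons_self
    have hne0 : ¬ k = k0 := fun h => (hne k0 List.mem_cons_self) h.symm
    simp only [List.foldl_cons]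
    have h1 : step ((k, x) :: D) k0 = (k, x) :: step D k0 := by
      rw [hstep _ _ (by simp [hk0]), hstep _ _ hk0]
      simp [amodify, pget, hne0]
    rw [h1]
    have hkeys : (step D k0).map Prod.fst = D.map Prod.fst := by
      rw [hstep _ _ hk0, keys_amodify]
    exact ih (step D k0) (fun y hy => hne y (List.mem_cons_of_mem _ hy))
      (fun y hy => by rw [hkeys]; exact hmem y (List.mem_cons_of_mem _ hy))

theorem fold_keys {α : Type} (dflt : α) (step : List (String × α) → String → List (String × α))
    (Φ : String → α → α → α)
    (hstep : ∀ acc k, k ∈ acc.map Prod.fst → step acc k = amodify acc k (Φ k (pget acc k dflt)))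
    (d : List (String × α)) (hnd : (d.map Prod.fst).Nodup) :
    (d.map Prod.fst).foldl step d = d.map (fun q => (q.1, Φ q.1 q.2 q.2)) := by
  induction d with
  | nil => rfl
  | cons p rest ih =>
    obtain ⟨k, v⟩ := p
    simp only [List.map_cons, List.foldl_cons]
    have h0 : step ((k, v) :: rest) k = (k, Φ k v v) :: rest := by
      rw [hstep _ _ (by simp)]
      simp [amodify, pget]
    rw [h0]
    have hnd' : k ∉ rest.map Prod.fst ∧ (rest.map Prod.fst).Nodup := by
      simpa [List.nodup_cons] using hnd
    rw [fold_cons_comm dflt step Φ hstep _ k (Φ k v v) rest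
      (fun y hy h => hnd'.1 (h ▸ hy)) (fun y hy => hy)]
    rw [ih hnd'.2]

-- A-side loop characterisations: the in-place loop nests compute a map over a with
-- nested first-match lookups into b.
theorem loop2_eq (yb d : List (String × List (String × Int)))
    (h1 : (d.map Prod.fst).Nodup) (h2 : ∀ p ∈ d, (p.2.map Prod.fst).Nodup) :
    (d.map Prod.fst).foldl (fun acc key =>
        ((pget acc key []).map Prod.fst).foldl (fun ac kkey =>
          amodify ac key (fun inner => amodify inner kkey (fun v => v + pget (pget yb key []) kkey 0))) acc) d
      = d.map (fun p => (p.1, p.2.map (fun q => (q.1, q.2 + pget (pget yb p.1 []) q.1 0)))) := by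
  rw [fold_keys ([] : List (String × Int)) _
    (fun key cur => fun w => (cur.map Prod.fst).foldl
      (fun w kkey => amodify w kkey (fun v => v + pget (pget yb key []) kkey 0)) w)
    (fun acc key _ => foldl_amodify_same key _ _ acc) d h1]
  refine List.map_congr_left (fun q hq => ?_)
  congr 1
  rw [fold_keys (0 : Int) _
    (fun kkey _ => fun v => v + pget (pget yb q.1 []) kkey 0)
    (fun acc kkey _ => rfl) q.2 (h2 q hq)]

theorem loop3_eq (yb d : List (String × List (String × List (String × Int))))
    (h1 : (d.map Prod.fst).Nodup)
    (h2 : ∀ p ∈ d, (p.2.map Prod.fst).Nodup ∧ ∀ q ∈ p.2, (q.2.map Prod.fst).Nodup) :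
    (d.map Prod.fst).foldl (fun acc t =>
        ((pget acc t []).map Prod.fst).foldl (fun ac key =>
          ((pget (pget ac t []) key []).map Prod.fst).foldl (fun ac2 kkey =>
            amodify ac2 t (fun d2 => amodify d2 key (fun d1 => amodify d1 kkey (fun v => v + pget (pget (pget yb t []) key []) kkey 0)))) ac) acc) d
      = d.map (fun p => (p.1, p.2.map (fun q => (q.1, q.2.map (fun r => (r.1, r.2 + pget (pget (pget yb p.1 []) q.1 []) r.1 0)))))) := by
  have hmid : ∀ (t : String) (ac : List (String × List (String × List (String × Int)))) (key : String),
      ((pget (pget ac t []) key []).map Prod.fst).foldl (fun ac2 kkey =>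
          amodify ac2 t (fun d2 => amodify d2 key (fun d1 => amodify d1 kkey (fun v => v + pget (pget (pget yb t []) key []) kkey 0)))) ac
        = amodify ac t ((fun key cur => fun w => ((pget cur key []).map Prod.fst).foldl
            (fun w kkey => amodify w key (fun d1 => amodify d1 kkey (fun v => v + pget (pget (pget yb t []) key []) kkey 0))) w) key (pget ac t [])) :=
    fun t ac key => foldl_amodify_same t _ _ ac
  rw [fold_keys ([] : List (String × List (String × Int))) _
    (fun t cur => fun w => (cur.map Prod.fst).foldl
      (fun w key => ((pget w key []).map Prod.fst).foldl
        (fun w' kkey => amodify w' key (fun d1 => amodify d1 kkey (fun v => v + pget (pget (pget yb t []) key []) kkey 0))) w) w)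
    (fun acc t htm => by
      have := fold_modify_self t ([] : List (String × List (String × Int)))
        (fun key cur => fun w => ((pget cur key []).map Prod.fst).foldl
          (fun w kkey => amodify w key (fun d1 => amodify d1 kkey (fun v => v + pget (pget (pget yb t []) key []) kkey 0))) w)
        ((pget acc t []).map Prod.fst) acc htm
      simp only [hmid t]
      exact this) d h1]
  refine List.map_congr_left (fun p hp => ?_)
  congr 1
  rw [loop2_eq (pget yb p.1 []) p.2 (h2 p hp).1 (h2 p hp).2]

-- B-side lemmas: the flat path-keyed dict looks up like the nested lookup chain.
theorem foldl_app {α β : Type} (g : β → List α) (l : List β) (init : List α) :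
    l.foldl (fun o x => o ++ g x) init = init ++ l.flatMap g := by
  induction l generalizing init with
  | nil => simp
  | cons x l ih => simp [ih]

theorem flatten_single {α β : Type} (f : β → α) (l : List β) :
    (l.map (fun x => [f x])).flatten = l.map f := by
  induction l <;> simp [*]

theorem foldl_single {α β : Type} (f : β → α) (l : List β) :
    l.foldl (fun o x => o ++ [f x]) [] = l.map f := by
  rw [foldl_app]
  simp [List.flatMap, flatten_single]

theorem pget_not_mem {κ α : Type} [DecidableEq κ] {l : List (κ × α)} {k : κ} (d : α)
    (h : k ∉ l.map Prod.fst) : pget l k d = d := by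
  induction l with
  | nil => rfl
  | cons p rest ih =>
    simp only [List.map_cons, List.mem_cons, not_or] at h
    obtain ⟨k', v⟩ := p
    have hne : ¬ k' = k := fun hh => h.1 hh.symm
    simp [pget, hne, ih h.2]

theorem pget_append_left {κ α : Type} [DecidableEq κ] {xs : List (κ × α)} (ys : List (κ × α))
    {k : κ} (d : α) (h : k ∈ xs.map Prod.fst) : pget (xs ++ ys) k d = pget xs k d := by
  induction xs with
  | nil => simp at h
  | cons p rest ih =>
    obtain ⟨k', v⟩ := p
    by_cases hk : k' = k
    · simp [pget, hk]
    · have h' : k ∈ rest.map Prod.fst := by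
        rcases List.mem_cons.mp h with h1 | h1
        · exact absurd h1.symm hk
        · exact h1
      simp [pget, hk, ih h']

theorem pget_append_right {κ α : Type} [DecidableEq κ] {xs : List (κ × α)} (ys : List (κ × α))
    {k : κ} (d : α) (h : k ∉ xs.map Prod.fst) : pget (xs ++ ys) k d = pget ys k d := by
  induction xs with
  | nil => rfl
  | cons p rest ih =>
    simp only [List.map_cons, List.mem_cons, not_or] at h
    obtain ⟨k', v⟩ := p
    have hne : ¬ k' = k := fun hh => h.1 hh.symm
    simp [pget, hne, ih h.2]

theorem pget_block {κ α : Type} [DecidableEq κ] (t k : String) (kk : κ)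
    (m : List (κ × α)) (d : α) :
    pget (m.map (fun e => ((t, e.1), e.2))) (k, kk) d = if t = k then pget m kk d else d := by
  induction m with
  | nil => simp [pget]
  | cons e rest ih =>
    by_cases ht : t = k
    · subst ht
      by_cases he : e.1 = kk <;> simp [pget, Prod.ext_iff, he, ih]
    · simp [pget, Prod.ext_iff, ht, ih]

theorem flat_keys_fst {κ V α : Type} (F : V → List (κ × α)) (L : List (String × V))
    {k : String} {kk : κ}
    (h : (k, kk) ∈ (L.flatMap (fun p => (F p.2).map (fun e => ((p.1, e.1), e.2)))).map Prod.fst) :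
    k ∈ L.map Prod.fst := by
  simp only [List.map_flatMap, List.mem_flatMap, List.map_map, List.mem_map] at h
  obtain ⟨p, hp, e, _, he⟩ := h
  have : p.1 = k := congrArg Prod.fst he
  exact this ▸ List.mem_map_of_mem hp

theorem flat_prefix {κ V : Type} [DecidableEq κ] (F : V → List (κ × Int)) (v0 : V)
    (h0 : F v0 = []) (L : List (String × V)) (hnd : (L.map Prod.fst).Nodup)
    (k : String) (kk : κ) :
    pget (L.flatMap (fun p => (F p.2).map (fun e => ((p.1, e.1), e.2)))) (k, kk) 0
      = pget (F (pget L k v0)) kk 0 := by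
  induction L with
  | nil => simp [pget, h0]
  | cons p rest ih =>
    have hnd' : p.1 ∉ rest.map Prod.fst ∧ (rest.map Prod.fst).Nodup := by
      simpa [List.nodup_cons] using hnd
    obtain ⟨k', v⟩ := p
    simp only [List.flatMap_cons]
    by_cases hk : k' = k
    · subst hk
      have hv : pget ((k', v) :: rest) k' v0 = v := by simp [pget]
      rw [hv]
      by_cases hm : (k', kk) ∈ ((F v).map (fun e => ((k', e.1), e.2))).map Prod.fst
      · rw [pget_append_left _ _ hm, pget_block, if_pos rfl]
      · rw [pget_append_right _ _ hm]
        have hkk : kk ∉ (F v).map Prod.fst := by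
          intro hc
          exact hm (by
            simp only [List.map_map, List.mem_map] at hc ⊢
            obtain ⟨e, he, hee⟩ := hc
            exact ⟨e, he, by simp [Function.comp, hee]⟩)
        rw [pget_not_mem _ hkk]
        exact pget_not_mem _ (fun hc => hnd'.1 (flat_keys_fst F rest hc))
    · have hnb : (k, kk) ∉ ((F v).map (fun e => ((k', e.1), e.2))).map Prod.fst := by
        simp only [List.map_map, List.mem_map]
        rintro ⟨e, _, hee⟩
        exact hk (congrArg Prod.fst hee)
      rw [pget_append_right _ _ hnb]
      simp only [pget, if_neg hk]
      exact ih hnd'.2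

theorem flat2_lookup (L : List (String × List (String × Int)))
    (hnd : (L.map Prod.fst).Nodup) (k kk : String) :
    pget (L.flatMap (fun p => p.2.map (fun e => ((p.1, e.1), e.2)))) (k, kk) 0
      = pget (pget L k []) kk 0 := by
  simpa using flat_prefix (fun v => v) [] rfl L hnd k kk

theorem pget_cases {κ α : Type} [DecidableEq κ] (L : List (κ × α)) (k : κ) (d : α) :
    pget L k d = d ∨ ∃ p ∈ L, p.1 = k ∧ pget L k d = p.2 := by
  induction L with
  | nil => exact Or.inl rfl
  | cons p rest ih =>
    obtain ⟨k', v⟩ := p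
    by_cases hk : k' = k
    · exact Or.inr ⟨(k', v), List.mem_cons_self, hk, by simp [pget, hk]⟩
    · rcases ih with h | ⟨q, hq, h1, h2⟩
      · exact Or.inl (by simp [pget, hk, h])
      · exact Or.inr ⟨q, List.mem_cons_of_mem _ hq, h1, by simp [pget, hk, h2]⟩

theorem flat3_lookup (L : List (String × List (String × List (String × Int))))
    (hnd : (L.map Prod.fst).Nodup)
    (hnd2 : ∀ p ∈ L, (p.2.map Prod.fst).Nodup) (t k kk : String) :
    pget (L.flatMap (fun p => p.2.flatMap (fun q => q.2.map (fun r => ((p.1, q.1, r.1), r.2))))) (t, k, kk) 0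
      = pget (pget (pget L t []) k []) kk 0 := by
  have h1 := flat_prefix (fun v => v.flatMap (fun q => q.2.map (fun e => ((q.1, e.1), e.2))))
    [] rfl L hnd t (k, kk)
  have h2 : ∀ p : String × List (String × List (String × Int)),
      (p.2.flatMap (fun q => q.2.map (fun e => ((q.1, e.1), e.2)))).map (fun e => ((p.1, e.1), e.2))
        = p.2.flatMap (fun q => q.2.map (fun r => ((p.1, q.1, r.1), r.2))) := by
    intro p
    rw [List.map_flatMap]
    congr 1
    funext q
    rw [List.map_map]
    rfl
  simp only [h2] at h1
  rw [h1]
  have hnd3 : ((pget L t ([] : List (String × List (String × Int)))).map Prod.fst).Nodup := by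
    rcases pget_cases L t ([] : List (String × List (String × Int))) with h | ⟨p, hp, _, h2⟩
    · simp [h]
    · rw [h2]; exact hnd2 p hp
  exact flat2_lookup _ hnd3 k kk

theorem flatten2_eq (d : List (String × List (String × Int))) :
    flatten2 d = d.flatMap (fun p => p.2.map (fun e => ((p.1, e.1), e.2))) := by
  unfold flatten2
  rw [foldl_app]
  simp only [List.nil_append]
  congr 1
  funext p
  exact foldl_single _ _

theorem flatten3_eq (d : List (String × List (String × List (String × Int)))) :
    flatten3 d = d.flatMap (fun p => p.2.flatMap (fun q => q.2.map (fun r => ((p.1, q.1, r.1), r.2)))) := by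
  unfold flatten3
  rw [foldl_app]
  simp only [List.nil_append]
  congr 1
  funext p
  unfold flatten_mid
  rw [foldl_app]
  simp only [List.nil_append]
  congr 1
  funext q
  exact foldl_single _ _

-- ===== VERDICT (by name: the statement is the Claim_ definition above) =====
theorem metric_sum_spec : Claim_equal_metric_sum := by
  intro a b _ hpre
  obtain ⟨ha1, ha2, ha3, ha4, hb1, hb2, hb3, hb4, _, _⟩ := hpre
  unfold Spec_metric_sum metric_sum metric_sum_alt
  refine Prod.ext ?_ ?_
  · rw [loop2_eq b.1 a.1 ha1 ha2]
    refine List.map_congr_left (fun p _ => ?_)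
    congr 1
    refine List.map_congr_left (fun q _ => ?_)
    simp only [flatten2_eq, flat2_lookup b.1 hb1]
  · rw [loop3_eq b.2 a.2 ha3 ha4]
    refine List.map_congr_left (fun p _ => ?_)
    congr 1
    refine List.map_congr_left (fun q _ => ?_)
    congr 1
    refine List.map_congr_left (fun r _ => ?_)
    simp only [flatten3_eq, flat3_lookup b.2 hb3 (fun p hp => (hb4 p hp).1)]
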